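-- pv_equiv track=rewrite | github.com/MrChuse/noughts-n-crosses | mm_bot.py | touching
-- ===== SOURCE A (Python) =====
-- def touching(pos, field):
--     for di, dj in [(0, 1), (1, 0), (0, -1), (-1, 0), (-1, 1), (1, -1), (1, 1), (-1, -1)]:
--         new_i = pos[0] + di
--         new_j = pos[1] + dj
--         if 0 <= new_i < len(field) and 0 <= new_j < len(field[0]):
--            if field[new_i][new_j] is not None:
--                return True
--     return False
-- ===== SOURCE B (Python) =====
-- def _window(seq, k):
--     # elements at indices k-1, k, k+1, with slice bounds clamped to 0
--     # (avoids Python's negative-index wraparound)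
--     return seq[max(0, k - 1):max(0, k + 2)]
--
-- def touching(pos, field):
--     i, j = pos
--     for r, row in enumerate(_window(field, i), start=max(0, i - 1)):
--         for c, cell in enumerate(_window(row, j), start=max(0, j - 1)):
--             if (r, c) != (i, j) and cell is not None:
--                 return True
--     return False
-- ===== Notes on version B (the rewrite author's own statement) =====
-- stated objective: idiomatic
-- what changed: Replaces the loop over 8 hand-listed coordinate offsets with slicing out the clamped 3x3 neighborhood window (rows/cols k-1..k+1) and scanning it for any occupied cell while skipping the center position; Pre_ excludes fields whose rows adjacent to pos differ in length from row 0, where A's row-0 column bound can raise IndexError or accidentally probe/ignore cells.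
-- outside the precondition, e.g. on touching((0, 0), [[None], [None, 7]]): A returns False, B returns True
import Mathlib
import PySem

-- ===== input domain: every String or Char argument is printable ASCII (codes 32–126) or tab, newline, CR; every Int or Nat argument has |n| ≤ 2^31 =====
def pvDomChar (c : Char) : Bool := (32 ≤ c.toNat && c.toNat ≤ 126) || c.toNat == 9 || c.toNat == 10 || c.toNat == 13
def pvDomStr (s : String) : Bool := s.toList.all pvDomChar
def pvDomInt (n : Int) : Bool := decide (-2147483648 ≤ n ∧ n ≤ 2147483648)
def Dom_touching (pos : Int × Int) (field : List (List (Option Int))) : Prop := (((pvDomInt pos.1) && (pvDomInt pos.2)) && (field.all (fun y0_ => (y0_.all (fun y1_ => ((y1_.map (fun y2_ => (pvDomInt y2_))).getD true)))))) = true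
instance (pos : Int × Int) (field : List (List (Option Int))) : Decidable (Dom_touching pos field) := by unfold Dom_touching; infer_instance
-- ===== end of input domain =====

-- B replaces the loop over 8 hand-listed offsets by slicing out the clamped 3x3
-- neighborhood window and scanning it, skipping the center cell (objective: idiomatic).


-- ===== PORT A =====
def touching (pos : Int × Int) (field : List (List (Option Int))) : Bool :=
  [((0:Int), (1:Int)), (1, 0), (0, -1), (-1, 0), (-1, 1), (1, -1), (1, 1), (-1, -1)].any
    (fun d =>
      let new_i := pos.1 + d.1
      let new_j := pos.2 + d.2
      if 0 ≤ new_i ∧ new_i < (field.length : Int) ∧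
         0 ≤ new_j ∧ new_j < (((field.headD []).length : Int)) then
        -- field[new_i][new_j] is not None (indices are in range under Pre_)
        ((((PySem.List.pyGet? field new_i).getD []) |> (fun r => PySem.List.pyGet? r new_j)).getD none).isSome
      else false)

-- ===== PORT B =====
-- _window seq k = seq[max(0,k-1):max(0,k+2)]
def window {α : Type} (seq : List α) (k : Int) : List α :=
  PySem.List.slice seq (some (max 0 (k - 1))) (some (max 0 (k + 2)))

def touching_alt (pos : Int × Int) (field : List (List (Option Int))) : Bool :=
  let i := pos.1
  let j := pos.2
  (PySem.List.enumerate (window field i) (max 0 (i - 1))).any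
    (fun rrow =>
      (PySem.List.enumerate (window rrow.2 j) (max 0 (j - 1))).any
        (fun ccell =>
          (!(rrow.1 == i && ccell.1 == j)) && ccell.2.isSome))

-- ===== PRECONDITION & SPEC =====
-- Pre_ excludes fields whose rows adjacent to pos (the only rows A ever indexes) differ
-- in length from row 0: A uses len(field[0]) as the column bound for every row, so on such
-- ragged inputs it can raise IndexError, and where it returns, probing/ignoring cells by
-- row 0's width rather than the row's own is an accident of its implementation.
def Pre_touching (pos : Int × Int) (field : List (List (Option Int))) : Prop :=
  ∀ p ∈ field.zipIdx, pos.1 - 1 ≤ (p.2 : Int) → (p.2 : Int) ≤ pos.1 + 1 →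
    p.1.length = (field.headD []).length
instance (pos : Int × Int) (field : List (List (Option Int))) : Decidable (Pre_touching pos field) := by unfold Pre_touching; infer_instance

def pvWitness_touching : (Int × Int) × List (List (Option Int)) :=
  ((1, 1), [[none, some 1], [none, none]])

def Spec_touching (pos : Int × Int) (field : List (List (Option Int))) (out : Bool) : Prop := out = touching_alt pos field
instance (pos : Int × Int) (field : List (List (Option Int))) (out : Bool) : Decidable (Spec_touching pos field out) := by unfold Spec_touching; infer_instance

-- ===== CLAIM (what is proved, stated in full; the proofs are below) =====
def Claim_equal_touching : Prop := ∀ (pos : Int × Int) (field : List (List (Option Int))), Dom_touching pos field → Pre_touching pos field → Spec_touching pos field (touching pos field)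

-- ===== LEMMAS AND PROOFS =====

-- the cell expression both characterizations talk about (A's guarded double index)
def pvCell (field : List (List (Option Int))) (r c : Int) : Option Int :=
  (PySem.List.pyGet? ((PySem.List.pyGet? field r).getD []) c).getD none

-- common characterization: some in-bounds cell of the 3x3 window around pos,
-- other than pos itself, is occupied
def pvP (pos : Int × Int) (field : List (List (Option Int))) : Prop :=
  ∃ r c : Int, pos.1 - 1 ≤ r ∧ r ≤ pos.1 + 1 ∧ pos.2 - 1 ≤ c ∧ c ≤ pos.2 + 1 ∧
    ¬(r = pos.1 ∧ c = pos.2) ∧ 0 ≤ r ∧ (r : Int) < field.length ∧ 0 ≤ c ∧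
    (c : Int) < (field.headD []).length ∧ (pvCell field r c).isSome = true

lemma pv_ite_false {c : Prop} [Decidable c] (b : Bool) :
    ((if c then b else false) = true) ↔ (c ∧ b = true) := by
  split <;> simp_all

lemma pvP_of (pos : Int × Int) (field : List (List (Option Int))) (r c : Int)
    (h : (0 ≤ r ∧ (r : Int) < field.length ∧ 0 ≤ c ∧ (c : Int) < (field.headD []).length) ∧
      ((PySem.List.pyGet? ((PySem.List.pyGet? field r).getD []) c).getD none).isSome = true)
    (hb : pos.1 - 1 ≤ r ∧ r ≤ pos.1 + 1 ∧ pos.2 - 1 ≤ c ∧ c ≤ pos.2 + 1 ∧ ¬(r = pos.1 ∧ c = pos.2)) :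
    pvP pos field :=
  ⟨r, c, hb.1, hb.2.1, hb.2.2.1, hb.2.2.2.1, hb.2.2.2.2, h.1.1, h.1.2.1, h.1.2.2.1, h.1.2.2.2, h.2⟩

lemma window_facts {α : Type} (xs : List α) (t : Int) (k : Nat)
    (hk : k < (window xs t).length) :
    ∃ (h : (max 0 (t - 1)).toNat + k < xs.length),
      (window xs t)[k]'(by
        unfold window at hk ⊢
        rw [PySem.List.slice_toNat _ (le_max_left 0 _) (le_max_left 0 _)] at hk ⊢
        exact hk) = xs[(max 0 (t - 1)).toNat + k]'h ∧
      t - 1 ≤ (max 0 (t - 1) : Int) + k ∧ ((max 0 (t - 1) : Int) + k) ≤ t + 1 := by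
  unfold window at hk ⊢
  simp only [PySem.List.slice_toNat _ (le_max_left 0 _) (le_max_left 0 _)] at hk ⊢
  simp only [List.length_take, List.length_drop, lt_min_iff] at hk
  refine ⟨by omega, ?_, by omega, by omega⟩
  simp [List.getElem_take, List.getElem_drop]

lemma window_mem {α : Type} (xs : List α) (t : Int) (r : Int)
    (h0 : 0 ≤ r) (hn : r < xs.length) (h1 : t - 1 ≤ r) (h2 : r ≤ t + 1) :
    ∃ (k : Nat) (hk : k < (window xs t).length),
      ((max 0 (t - 1) : Int) + k = r) ∧
      (window xs t)[k]'hk = xs[r.toNat]'(by omega) := by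
  unfold window
  simp only [PySem.List.slice_toNat _ (le_max_left 0 _) (le_max_left 0 _)]
  refine ⟨(r - max 0 (t - 1)).toNat, ?_, by omega, ?_⟩
  · simp only [List.length_take, List.length_drop, lt_min_iff]
    omega
  · simp only [List.getElem_take, List.getElem_drop]
    congr 1
    omega

lemma touching_iff (pos : Int × Int) (field : List (List (Option Int))) :
    touching pos field = true ↔ pvP pos field := by
  unfold touching
  simp only [List.any_cons, List.any_nil, Bool.or_eq_true, Bool.or_false, pv_ite_false,
    add_zero, ← sub_eq_add_neg]
  constructor
  · rintro (h|h|h|h|h|h|h|h) <;> exact pvP_of pos field _ _ h (by refine ⟨?_, ?_, ?_, ?_, ?_⟩ <;> omega)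
  · rintro ⟨r, c, h1, h2, h3, h4, hne, h5, h6, h7, h8, hc⟩
    unfold pvCell at hc
    have hr : r = pos.1 - 1 ∨ r = pos.1 ∨ r = pos.1 + 1 := by omega
    have hcc : c = pos.2 - 1 ∨ c = pos.2 ∨ c = pos.2 + 1 := by omega
    rcases hr with hr|hr|hr <;> rcases hcc with h'|h'|h' <;> subst hr <;> subst h'
    · exact Or.inr (Or.inr (Or.inr (Or.inr (Or.inr (Or.inr (Or.inr ⟨⟨h5, h6, h7, h8⟩, hc⟩))))))
    · exact Or.inr (Or.inr (Or.inr (Or.inl ⟨⟨h5, h6, h7, h8⟩, hc⟩)))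
    · exact Or.inr (Or.inr (Or.inr (Or.inr (Or.inl ⟨⟨h5, h6, h7, h8⟩, hc⟩))))
    · exact Or.inr (Or.inr (Or.inl ⟨⟨h5, h6, h7, h8⟩, hc⟩))
    · exact absurd ⟨rfl, rfl⟩ hne
    · exact Or.inl ⟨⟨h5, h6, h7, h8⟩, hc⟩
    · exact Or.inr (Or.inr (Or.inr (Or.inr (Or.inr (Or.inl ⟨⟨h5, h6, h7, h8⟩, hc⟩)))))
    · exact Or.inr (Or.inl ⟨⟨h5, h6, h7, h8⟩, hc⟩)
    · exact Or.inr (Or.inr (Or.inr (Or.inr (Or.inr (Or.inr (Or.inl ⟨⟨h5, h6, h7, h8⟩, hc⟩))))))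


lemma touching_alt_iff (pos : Int × Int) (field : List (List (Option Int)))
    (hpre : Pre_touching pos field) :
    touching_alt pos field = true ↔ pvP pos field := by
  have hm : ∀ (idx : Nat) (h : idx < field.length), pos.1 - 1 ≤ (idx : Int) →
      (idx : Int) ≤ pos.1 + 1 → (field[idx]'h).length = (field.headD []).length :=
    fun idx h => by
      have hmem : (field[idx]'h, idx) ∈ field.zipIdx := by
        have := List.getElem_zipIdx (l := field) (i := idx) (j := 0) (h := by simpa using h)
        simp only [Nat.zero_add] at this
        exact this ▸ List.getElem_mem _
      exact hpre _ hmem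
  unfold touching_alt
  simp only [List.any_eq_true, PySem.List.mem_enumerate_iff]
  constructor
  · rintro ⟨p, ⟨k, hk, rfl⟩, q, ⟨l, hl, rfl⟩, hb⟩
    simp only [Bool.and_eq_true, Bool.not_eq_true', Bool.and_eq_false_iff,
      beq_eq_false_iff_ne, ne_eq] at hb
    obtain ⟨hne, hsome⟩ := hb
    obtain ⟨hA1, hget1, hb1, hb2⟩ := window_facts field pos.1 k hk
    simp only [hget1] at hl hsome
    obtain ⟨hA2, hget2, hb3, hb4⟩ := window_facts (field[(max 0 (pos.1 - 1)).toNat + k]) pos.2 l hl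
    simp only [hget2] at hsome
    have hA2' := hA2
    rw [hm _ hA1 (by omega) (by omega)] at hA2'
    refine ⟨((max 0 (pos.1 - 1)).toNat + k : Nat), ((max 0 (pos.2 - 1)).toNat + l : Nat),
      by omega, by omega, by omega, by omega, ?_, by omega, by omega, by omega, by omega, ?_⟩
    · rcases hne with h | h
      · intro hcon; exact h (by omega)
      · intro hcon; exact h (by omega)
    · unfold pvCell
      simp only [PySem.List.pyGet?_natCast, List.getElem?_eq_getElem hA1, Option.getD_some,
        List.getElem?_eq_getElem hA2]
      exact hsome
  · rintro ⟨r, c, h1, h2, h3, h4, hne, h5, h6, h7, h8, hc⟩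
    obtain ⟨k, hk, hcoord1, hget1⟩ := window_mem field pos.1 r h5 h6 h1 h2
    have hrowlen : (field[r.toNat]'(by omega)).length = (field.headD []).length :=
      hm _ (by omega) (by omega) (by omega)
    obtain ⟨l, hl, hcoord2, hget2⟩ :=
      window_mem (field[r.toNat]'(by omega)) pos.2 c h7 (by rw [hrowlen]; exact h8) h3 h4
    refine ⟨_, ⟨k, hk, rfl⟩, _, ⟨l, ?_, rfl⟩, ?_⟩
    · simp only [hget1]; exact hl
    · simp only [Bool.and_eq_true, Bool.not_eq_true', Bool.and_eq_false_iff,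
        beq_eq_false_iff_ne, ne_eq]
      simp only [hget1, hget2]
      constructor
      · by_cases hri : r = pos.1
        · right; intro hcon; exact hne ⟨hri, by omega⟩
        · left; omega
      · unfold pvCell at hc
        rw [PySem.List.pyGet?_eq_some_getElem field h5 h6] at hc
        simp only [Option.getD_some] at hc
        rw [PySem.List.pyGet?_eq_some_getElem _ h7 (by rw [hrowlen]; exact h8)] at hc
        simpa using hc

-- ===== VERDICT (by name: the statement is the Claim_ definition above) =====
theorem touching_spec : Claim_equal_touching := by
  intro pos field _ hpre
  unfold Spec_touching
  rcases hA : touching pos field with _ | _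
  · rcases hB : touching_alt pos field with _ | _
    · rfl
    · exact absurd ((touching_iff pos field).mpr ((touching_alt_iff pos field hpre).mp hB))
        (by simp [hA])
  · exact ((touching_alt_iff pos field hpre).mpr ((touching_iff pos field).mp hA)).symm
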